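-- pv_equiv track=rewrite | github.com/mbaula/linkedinscraper | services/job_service.py | filter_jobs_by_config
-- ===== SOURCE A (Python) =====
-- def filter_jobs_by_config(jobs_list, config):
--     """
--     Apply config filters to jobs list (for existing jobs in database).
--
--     Args:
--         jobs_list (list): List of job dictionaries
--         config (dict): Configuration dictionary
--
--     Returns:
--         list: Filtered list of job dictionaries
--     """
--     filtered_jobs = jobs_list.copy()
--
--     # Filter by title_exclude (case insensitive)
--     title_exclude = config.get('title_exclude', [])
--     if title_exclude and len(title_exclude) > 0:
--         title_exclude = [word.strip().lower() for word in title_exclude if word and word.strip()]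
--         if title_exclude:
--             filtered_jobs = [
--                 job for job in filtered_jobs
--                 if job.get('title') and not any(
--                     exclude_word in (job.get('title', '') or '').lower()
--                     for exclude_word in title_exclude
--                 )
--             ]
--
--     # Filter by title_include (case insensitive)
--     title_include = config.get('title_include', [])
--     if title_include and len(title_include) > 0:
--         title_include = [word.strip().lower() for word in title_include if word and word.strip()]
--         if title_include:
--             filtered_jobs = [
--                 job for job in filtered_jobs
--                 if job.get('title') and any(
--                     include_word in (job.get('title', '') or '').lower()
--                     for include_word in title_include
--                 )
--             ]
--
--     # Filter by desc_words (case insensitive)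
--     desc_words = config.get('desc_words', [])
--     if desc_words and len(desc_words) > 0:
--         desc_words = [word.strip().lower() for word in desc_words if word and word.strip()]
--         if desc_words:
--             filtered_jobs = [
--                 job for job in filtered_jobs
--                 if job.get('job_description') and not any(
--                     desc_word in (job.get('job_description', '') or '').lower()
--                     for desc_word in desc_words
--                 )
--             ]
--
--     # Filter by company_exclude (case insensitive)
--     company_exclude = config.get('company_exclude', [])
--     if company_exclude and len(company_exclude) > 0:
--         company_exclude = [word.strip().lower() for word in company_exclude if word and word.strip()]
--         if company_exclude:
--             filtered_jobs = [
--                 job for job in filtered_jobs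
--                 if job.get('company') and not any(
--                     company_word in (job.get('company', '') or '').lower()
--                     for company_word in company_exclude
--                 )
--             ]
--
--     return filtered_jobs
-- ===== SOURCE B (Python) =====
-- def filter_jobs_by_config(jobs_list, config):
--     """Single pass: clean the four keyword lists once, then keep each job
--     only if it passes every active condition."""
--     def clean(key):
--         words = config.get(key, []) or []
--         return [w.strip().lower() for w in words if w and w.strip()]
--
--     t_ex = clean('title_exclude')
--     t_in = clean('title_include')
--     d_ex = clean('desc_words')
--     c_ex = clean('company_exclude')
--
--     def field_ok(job, field, words, include):
--         if not words:
--             return True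
--         val = job.get(field)
--         if not val:
--             return False
--         low = val.lower()
--         hit = any(w in low for w in words)
--         return hit if include else not hit
--
--     return [job for job in jobs_list
--             if field_ok(job, 'title', t_ex, False)
--             and field_ok(job, 'title', t_in, True)
--             and field_ok(job, 'job_description', d_ex, False)
--             and field_ok(job, 'company', c_ex, False)]
-- ===== Notes on version B (the rewrite author's own statement) =====
-- stated objective: simpler
-- what changed: B cleans the four keyword lists once up front and filters the jobs list in a single pass with one combined predicate (shared field_ok helper), instead of A's four separate list-comprehension filter passes each rebuilding its keyword list inline.
import Mathlib
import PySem

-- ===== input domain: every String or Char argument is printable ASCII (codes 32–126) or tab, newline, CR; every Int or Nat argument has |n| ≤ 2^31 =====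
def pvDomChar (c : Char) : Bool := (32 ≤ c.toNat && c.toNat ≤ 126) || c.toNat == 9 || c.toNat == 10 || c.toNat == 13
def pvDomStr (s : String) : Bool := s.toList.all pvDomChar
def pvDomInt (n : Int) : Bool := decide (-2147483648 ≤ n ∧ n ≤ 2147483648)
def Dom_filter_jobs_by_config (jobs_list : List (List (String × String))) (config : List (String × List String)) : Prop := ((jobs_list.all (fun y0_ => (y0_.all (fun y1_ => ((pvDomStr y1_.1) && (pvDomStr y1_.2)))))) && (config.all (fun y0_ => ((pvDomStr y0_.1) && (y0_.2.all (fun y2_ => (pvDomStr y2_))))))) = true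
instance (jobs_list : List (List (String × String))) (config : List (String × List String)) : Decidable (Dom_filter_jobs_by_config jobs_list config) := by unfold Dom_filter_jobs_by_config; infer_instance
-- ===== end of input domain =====

-- B cleans the four keyword lists once and filters the jobs in a single pass with one combined
-- predicate, instead of A's four separate filter passes; objective: simpler.

-- ===== PORT A =====
-- dict.get(k, default) on an association list: first match
def pvCfgGet (config : List (String × List String)) (k : String) : List String :=
  match config.find? (fun p => p.1 == k) with
  | some p => p.2
  | none => []

def pvJobGet? (job : List (String × String)) (k : String) : Option String :=
  match job.find? (fun p => p.1 == k) with
  | some p => some p.2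
  | none => none

def pvJobGetD (job : List (String × String)) (k : String) (d : String) : String :=
  (pvJobGet? job k).getD d

def filter_jobs_by_config (jobs_list : List (List (String × String))) (config : List (String × List String)) : List (List (String × String)) :=
  let filtered_jobs := jobs_list
  -- Filter by title_exclude (case insensitive)
  let title_exclude := pvCfgGet config "title_exclude"
  let filtered_jobs :=
    if title_exclude ≠ [] ∧ 0 < title_exclude.length then
      let title_exclude := (title_exclude.filter (fun w => w ≠ "" && PySem.Str.strip w ≠ "")).map (fun w => PySem.Str.lower (PySem.Str.strip w))
      if title_exclude ≠ [] then
        filtered_jobs.filter (fun job =>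
          (match pvJobGet? job "title" with | none => false | some v => decide (v ≠ "")) &&
          !(title_exclude.any (fun ew => PySem.Str.isIn ew (PySem.Str.lower (pvJobGetD job "title" "")))))
      else filtered_jobs
    else filtered_jobs
  -- Filter by title_include (case insensitive)
  let title_include := pvCfgGet config "title_include"
  let filtered_jobs :=
    if title_include ≠ [] ∧ 0 < title_include.length then
      let title_include := (title_include.filter (fun w => w ≠ "" && PySem.Str.strip w ≠ "")).map (fun w => PySem.Str.lower (PySem.Str.strip w))
      if title_include ≠ [] then
        filtered_jobs.filter (fun job =>
          (match pvJobGet? job "title" with | none => false | some v => decide (v ≠ "")) &&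
          (title_include.any (fun iw => PySem.Str.isIn iw (PySem.Str.lower (pvJobGetD job "title" "")))))
      else filtered_jobs
    else filtered_jobs
  -- Filter by desc_words (case insensitive)
  let desc_words := pvCfgGet config "desc_words"
  let filtered_jobs :=
    if desc_words ≠ [] ∧ 0 < desc_words.length then
      let desc_words := (desc_words.filter (fun w => w ≠ "" && PySem.Str.strip w ≠ "")).map (fun w => PySem.Str.lower (PySem.Str.strip w))
      if desc_words ≠ [] then
        filtered_jobs.filter (fun job =>
          (match pvJobGet? job "job_description" with | none => false | some v => decide (v ≠ "")) &&
          !(desc_words.any (fun dw => PySem.Str.isIn dw (PySem.Str.lower (pvJobGetD job "job_description" "")))))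
      else filtered_jobs
    else filtered_jobs
  -- Filter by company_exclude (case insensitive)
  let company_exclude := pvCfgGet config "company_exclude"
  let filtered_jobs :=
    if company_exclude ≠ [] ∧ 0 < company_exclude.length then
      let company_exclude := (company_exclude.filter (fun w => w ≠ "" && PySem.Str.strip w ≠ "")).map (fun w => PySem.Str.lower (PySem.Str.strip w))
      if company_exclude ≠ [] then
        filtered_jobs.filter (fun job =>
          (match pvJobGet? job "company" with | none => false | some v => decide (v ≠ "")) &&
          !(company_exclude.any (fun cw => PySem.Str.isIn cw (PySem.Str.lower (pvJobGetD job "company" "")))))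
      else filtered_jobs
    else filtered_jobs
  filtered_jobs

-- ===== PORT B =====
def pvClean (config : List (String × List String)) (k : String) : List String :=
  (pvCfgGet config k |>.filter (fun w => w ≠ "" && PySem.Str.strip w ≠ "")).map
    (fun w => PySem.Str.lower (PySem.Str.strip w))

def pvFieldOk (job : List (String × String)) (field : String) (words : List String) (include_ : Bool) : Bool :=
  if words.isEmpty then true
  else
    let val := pvJobGetD job field ""
    if val == "" then false
    else
      let low := PySem.Str.lower val
      let hit := words.any (fun w => PySem.Str.isIn w low)
      if include_ then hit else !hit

def filter_jobs_by_config_alt (jobs_list : List (List (String × String))) (config : List (String × List String)) : List (List (String × String)) :=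
  let t_ex := pvClean config "title_exclude"
  let t_in := pvClean config "title_include"
  let d_ex := pvClean config "desc_words"
  let c_ex := pvClean config "company_exclude"
  jobs_list.filter (fun job =>
    pvFieldOk job "title" t_ex false &&
    pvFieldOk job "title" t_in true &&
    pvFieldOk job "job_description" d_ex false &&
    pvFieldOk job "company" c_ex false)

-- ===== PRECONDITION & SPEC =====
def Spec_filter_jobs_by_config (jobs_list : List (List (String × String))) (config : List (String × List String)) (out : List (List (String × String))) : Prop := out = filter_jobs_by_config_alt jobs_list config
instance (jobs_list : List (List (String × String))) (config : List (String × List String)) (out : List (List (String × String))) : Decidable (Spec_filter_jobs_by_config jobs_list config out) := by unfold Spec_filter_jobs_by_config; infer_instance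

-- ===== CLAIM (what is proved, stated in full; the proofs are below) =====
def Claim_equal_filter_jobs_by_config : Prop := ∀ (jobs_list : List (List (String × String))) (config : List (String × List String)), Dom_filter_jobs_by_config jobs_list config → Spec_filter_jobs_by_config jobs_list config (filter_jobs_by_config jobs_list config)

-- ===== LEMMAS AND PROOFS =====

-- A's per-job truthiness test equals the getD-based test B uses
theorem pvTruthy_eq (job : List (String × String)) (f : String) :
    (match pvJobGet? job f with | none => false | some v => decide (v ≠ "")) =
      !(pvJobGetD job f "" == "") := by
  unfold pvJobGetD
  cases pvJobGet? job f with
  | none => simp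
  | some v => by_cases h : v = "" <;> simp_all

-- an "exclude" pass of A equals one filter by pvFieldOk _ _ _ false
theorem passEx_eq (l : List (List (String × String))) (raw : List String) (f : String) :
    (if raw ≠ [] ∧ 0 < raw.length then
      if (raw.filter (fun w => w ≠ "" && PySem.Str.strip w ≠ "")).map (fun w => PySem.Str.lower (PySem.Str.strip w)) ≠ [] then
        l.filter (fun job =>
          (match pvJobGet? job f with | none => false | some v => decide (v ≠ "")) &&
          !(((raw.filter (fun w => w ≠ "" && PySem.Str.strip w ≠ "")).map (fun w => PySem.Str.lower (PySem.Str.strip w))).any (fun ew => PySem.Str.isIn ew (PySem.Str.lower (pvJobGetD job f "")))))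
      else l
    else l) =
    l.filter (fun job => pvFieldOk job f ((raw.filter (fun w => w ≠ "" && PySem.Str.strip w ≠ "")).map (fun w => PySem.Str.lower (PySem.Str.strip w))) false) := by
  set c := (raw.filter (fun w => w ≠ "" && PySem.Str.strip w ≠ "")).map (fun w => PySem.Str.lower (PySem.Str.strip w)) with hc
  by_cases hcne : c = []
  · simp [pvFieldOk, hcne]
  · have hraw : raw ≠ [] ∧ 0 < raw.length := by
      rcases List.exists_mem_of_ne_nil c hcne with ⟨x, hx⟩
      rw [hc] at hx
      rcases List.mem_map.mp hx with ⟨w, hw, _⟩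
      have := List.mem_of_mem_filter hw
      exact ⟨List.ne_nil_of_mem this, List.length_pos_of_mem this⟩
    rw [if_pos hraw, if_pos hcne]
    apply List.filter_congr
    intro job _
    rw [pvTruthy_eq]
    have hne : c.isEmpty = false := by simp [hcne]
    simp only [pvFieldOk, hne, Bool.false_eq_true, if_false]
    cases h : (pvJobGetD job f "" == "") <;> simp_all

-- an "include" pass of A equals one filter by pvFieldOk _ _ _ true
theorem passIn_eq (l : List (List (String × String))) (raw : List String) (f : String) :
    (if raw ≠ [] ∧ 0 < raw.length then
      if (raw.filter (fun w => w ≠ "" && PySem.Str.strip w ≠ "")).map (fun w => PySem.Str.lower (PySem.Str.strip w)) ≠ [] then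
        l.filter (fun job =>
          (match pvJobGet? job f with | none => false | some v => decide (v ≠ "")) &&
          (((raw.filter (fun w => w ≠ "" && PySem.Str.strip w ≠ "")).map (fun w => PySem.Str.lower (PySem.Str.strip w))).any (fun iw => PySem.Str.isIn iw (PySem.Str.lower (pvJobGetD job f "")))))
      else l
    else l) =
    l.filter (fun job => pvFieldOk job f ((raw.filter (fun w => w ≠ "" && PySem.Str.strip w ≠ "")).map (fun w => PySem.Str.lower (PySem.Str.strip w))) true) := by
  set c := (raw.filter (fun w => w ≠ "" && PySem.Str.strip w ≠ "")).map (fun w => PySem.Str.lower (PySem.Str.strip w)) with hc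
  by_cases hcne : c = []
  · simp [pvFieldOk, hcne]
  · have hraw : raw ≠ [] ∧ 0 < raw.length := by
      rcases List.exists_mem_of_ne_nil c hcne with ⟨x, hx⟩
      rw [hc] at hx
      rcases List.mem_map.mp hx with ⟨w, hw, _⟩
      have := List.mem_of_mem_filter hw
      exact ⟨List.ne_nil_of_mem this, List.length_pos_of_mem this⟩
    rw [if_pos hraw, if_pos hcne]
    apply List.filter_congr
    intro job _
    rw [pvTruthy_eq]
    have hne : c.isEmpty = false := by simp [hcne]
    simp only [pvFieldOk, hne, Bool.false_eq_true, if_false]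
    cases h : (pvJobGetD job f "" == "") <;> simp_all

-- ===== VERDICT (by name: the statement is the Claim_ definition above) =====
theorem filter_jobs_by_config_spec : Claim_equal_filter_jobs_by_config := by
  intro jobs_list config _
  unfold Spec_filter_jobs_by_config
  show filter_jobs_by_config jobs_list config = filter_jobs_by_config_alt jobs_list config
  simp only [filter_jobs_by_config, filter_jobs_by_config_alt, pvClean]
  rw [passEx_eq, passIn_eq, passEx_eq, passEx_eq]
  simp only [List.filter_filter]
  apply List.filter_congr
  intro job _
  simp [Bool.and_comm]
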